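-- pv_equiv track=rewrite | github.com/Mike-The-Knight/Computer-Networking-Coursework-COM2022 | Server.py | symptomsReturn
-- ===== SOURCE A (Python) =====
-- mild_symptoms = [
--     "COUGH",
--     "SNEEZE",
--     "FEVER",
--     "HEADACHE"
-- ]
--
-- severe_symptoms = [
--     "LOSS OF SMELL",
--     "LOSS OF TASTE"
-- ]
--
-- def symptomsReturn(message):
--     # Split up the message (we dont want commas)
--     split_message = message.split(", ")
--
--     # Count of number of mild or severe symptoms
--     MildSymptoms = 0
--     SevereSymptoms = 0
--
--     # Response to be sent back
--     Return_Message = ""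
--
--     if split_message == "no symptoms":
--         Return_Message = "no symptoms"
--         return Return_Message
--
--     # Iterate through the mild symptoms and cross check them with the message, if they match then increase the number of mild symptoms
--     for i in range (0, len(mild_symptoms)):
--         for x in range (0, len(split_message)):
--             if split_message[x].upper() == mild_symptoms[i]:
--                 MildSymptoms += 1
--     # Iterate through the severe symptoms and cross check them with the message, if they match then increase the number of severe symptoms
--     for i in range (0, len(severe_symptoms)):
--         for x in range (0, len(split_message)):
--             if split_message[x].upper() == severe_symptoms[i]:
--                 SevereSymptoms += 1
--
--     # Form the response based on number of severe symptoms or mild symptoms (number of mild symptoms needed agreed upon by group)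
--     if MildSymptoms >= 3 and SevereSymptoms == 0:
--         Return_Message = "mild symptoms"
--     elif SevereSymptoms >0 :
--         Return_Message = "severe symptoms"
--     elif MildSymptoms < 3 and SevereSymptoms == 0:
--         Return_Message = "no symptoms"
--
--     return Return_Message
-- ===== SOURCE B (Python) =====
-- MILD_SET = {"COUGH", "SNEEZE", "FEVER", "HEADACHE"}
-- SEVERE_SET = {"LOSS OF SMELL", "LOSS OF TASTE"}
--
-- def symptomsReturn(message):
--     mild = 0
--     severe = 0
--     for token in message.split(", "):
--         w = token.upper()
--         if w in MILD_SET: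
--             mild += 1
--         elif w in SEVERE_SET:
--             severe += 1
--     if severe > 0:
--         return "severe symptoms"
--     return "mild symptoms" if mild >= 3 else "no symptoms"
-- ===== Notes on version B (the rewrite author's own statement) =====
-- stated objective: simpler
-- what changed: Replaced the two nested symptom-by-token scans with a single pass over the tokens using two constant symptom sets, and dropped A's dead guard that compares the token list against a plain string (always False).
import Mathlib
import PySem

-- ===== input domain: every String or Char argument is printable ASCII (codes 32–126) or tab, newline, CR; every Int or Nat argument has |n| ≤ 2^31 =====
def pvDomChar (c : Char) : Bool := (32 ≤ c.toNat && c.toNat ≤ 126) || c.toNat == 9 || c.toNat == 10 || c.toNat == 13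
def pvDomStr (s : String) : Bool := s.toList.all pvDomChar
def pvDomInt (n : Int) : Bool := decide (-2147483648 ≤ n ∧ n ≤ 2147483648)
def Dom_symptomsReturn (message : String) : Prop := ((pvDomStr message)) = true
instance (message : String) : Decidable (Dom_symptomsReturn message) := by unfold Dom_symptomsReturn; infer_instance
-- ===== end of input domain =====

-- B replaces A's two nested symptom-by-token scans with a single pass over the tokens
-- using two constant symptom sets (objective: simpler).

-- ===== PORT A =====
def pvMild : List String := ["COUGH", "SNEEZE", "FEVER", "HEADACHE"]
def pvSevere : List String := ["LOSS OF SMELL", "LOSS OF TASTE"]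

def symptomsReturn (message : String) : String :=
  -- `message.split(", ")`: the separator is a non-empty literal, so split? is always `some`
  let split_message := (PySem.Str.split? message ", ").getD []
  -- Python's dead guard compares the token list against a plain str: always False, ported as nothing
  let mildCount : Int :=
    (PySem.List.pyRange 0 (pvMild.length : Int) 1).foldl (fun acc i =>
      (PySem.List.pyRange 0 (split_message.length : Int) 1).foldl (fun acc2 x =>
        if PySem.Str.upper (PySem.List.pyGetD split_message x "")
            == PySem.List.pyGetD pvMild i "" then acc2 + 1 else acc2) acc) 0
  let severeCount : Int :=
    (PySem.List.pyRange 0 (pvSevere.length : Int) 1).foldl (fun acc i =>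
      (PySem.List.pyRange 0 (split_message.length : Int) 1).foldl (fun acc2 x =>
        if PySem.Str.upper (PySem.List.pyGetD split_message x "")
            == PySem.List.pyGetD pvSevere i "" then acc2 + 1 else acc2) acc) 0
  if mildCount ≥ 3 ∧ severeCount = 0 then "mild symptoms"
  else if severeCount > 0 then "severe symptoms"
  else if mildCount < 3 ∧ severeCount = 0 then "no symptoms"
  else ""

-- ===== PORT B =====
def pvMildSet : PySem.Set String := PySem.Set.ofList ["COUGH", "SNEEZE", "FEVER", "HEADACHE"]
def pvSevereSet : PySem.Set String := PySem.Set.ofList ["LOSS OF SMELL", "LOSS OF TASTE"]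

def symptomsReturn_alt (message : String) : String :=
  let counts := ((PySem.Str.split? message ", ").getD []).foldl
    (fun (p : Int × Int) token =>
      let w := PySem.Str.upper token
      if PySem.Set.contains pvMildSet w then (p.1 + 1, p.2)
      else if PySem.Set.contains pvSevereSet w then (p.1, p.2 + 1)
      else p) ((0 : Int), (0 : Int))
  if counts.2 > 0 then "severe symptoms"
  else if counts.1 ≥ 3 then "mild symptoms"
  else "no symptoms"

-- ===== PRECONDITION & SPEC =====
def Spec_symptomsReturn (message : String) (out : String) : Prop := out = symptomsReturn_alt message
instance (message : String) (out : String) : Decidable (Spec_symptomsReturn message out) := by unfold Spec_symptomsReturn; infer_instance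

-- ===== CLAIM (what is proved, stated in full; the proofs are below) =====
def Claim_equal_symptomsReturn : Prop := ∀ (message : String), Dom_symptomsReturn message → Spec_symptomsReturn message (symptomsReturn message)

-- ===== LEMMAS AND PROOFS =====

-- Per-token: the four per-symptom indicators sum to the mild-set membership indicator.
theorem pvMildIndicator (w : String) :
    ((if w == "COUGH" then 1 else 0) + ((if w == "SNEEZE" then 1 else 0)
      + ((if w == "FEVER" then 1 else 0) + (if w == "HEADACHE" then 1 else 0))))
    = (if PySem.Set.contains pvMildSet w then (1 : Nat) else 0) := by
  by_cases h : w ∈ pvMildSet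
  · have h' : w = "COUGH" ∨ w = "SNEEZE" ∨ w = "FEVER" ∨ w = "HEADACHE" := by
      simpa [pvMildSet, PySem.Set.mem_ofList] using h
    rcases h' with h' | h' | h' | h' <;> subst h' <;> decide
  · have h' : ¬(w = "COUGH" ∨ w = "SNEEZE" ∨ w = "FEVER" ∨ w = "HEADACHE") := by
      simpa [pvMildSet, PySem.Set.mem_ofList] using h
    push Not at h'
    simp [h'.1, h'.2.1, h'.2.2.1, h'.2.2.2, h]

theorem pvSevereIndicator (w : String) :
    ((if w == "LOSS OF SMELL" then 1 else 0) + (if w == "LOSS OF TASTE" then 1 else 0))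
    = (if PySem.Set.contains pvSevereSet w then (1 : Nat) else 0) := by
  by_cases h : w ∈ pvSevereSet
  · have h' : w = "LOSS OF SMELL" ∨ w = "LOSS OF TASTE" := by
      simpa [pvSevereSet, PySem.Set.mem_ofList] using h
    rcases h' with h' | h' <;> subst h' <;> decide
  · have h' : ¬(w = "LOSS OF SMELL" ∨ w = "LOSS OF TASTE") := by
      simpa [pvSevereSet, PySem.Set.mem_ofList] using h
    push Not at h'
    simp [h'.1, h'.2, h]

-- A token matching the mild set never matches the severe set (the sets are disjoint).
theorem pvDisjoint (w : String) (hm : PySem.Set.contains pvMildSet w = true) :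
    PySem.Set.contains pvSevereSet w = false := by
  have h : w = "COUGH" ∨ w = "SNEEZE" ∨ w = "FEVER" ∨ w = "HEADACHE" := by
    have : w ∈ pvMildSet := by simpa using hm
    simpa [pvMildSet, PySem.Set.mem_ofList] using this
  rcases h with h | h | h | h <;> subst h <;> decide

-- The four per-symptom occurrence counts sum to the mild-set membership count.
theorem pvMildSum (l : List String) :
    l.countP (fun t => PySem.Str.upper t == "COUGH")
      + l.countP (fun t => PySem.Str.upper t == "SNEEZE")
      + l.countP (fun t => PySem.Str.upper t == "FEVER")
      + l.countP (fun t => PySem.Str.upper t == "HEADACHE")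
    = l.countP (fun t => PySem.Set.contains pvMildSet (PySem.Str.upper t)) := by
  induction l with
  | nil => simp
  | cons h t ih =>
    simp only [List.countP_cons]
    have key := pvMildIndicator (PySem.Str.upper h)
    omega

theorem pvSevereSum (l : List String) :
    l.countP (fun t => PySem.Str.upper t == "LOSS OF SMELL")
      + l.countP (fun t => PySem.Str.upper t == "LOSS OF TASTE")
    = l.countP (fun t => PySem.Set.contains pvSevereSet (PySem.Str.upper t)) := by
  induction l with
  | nil => simp
  | cons h t ih =>
    simp only [List.countP_cons]
    have key := pvSevereIndicator (PySem.Str.upper h)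
    omega

-- B's single-pass fold computes the two per-set occurrence counts.
theorem pvFoldB (l : List String) (a b : Int) :
    l.foldl (fun (p : Int × Int) token =>
      let w := PySem.Str.upper token
      if PySem.Set.contains pvMildSet w then (p.1 + 1, p.2)
      else if PySem.Set.contains pvSevereSet w then (p.1, p.2 + 1)
      else p) (a, b)
    = (a + (l.countP (fun t => PySem.Set.contains pvMildSet (PySem.Str.upper t)) : Int),
       b + (l.countP (fun t => PySem.Set.contains pvSevereSet (PySem.Str.upper t)) : Int)) := by
  induction l generalizing a b with
  | nil => simp
  | cons h t ih =>
    simp only [List.foldl_cons, List.countP_cons]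
    by_cases hm : PySem.Set.contains pvMildSet (PySem.Str.upper h) = true
    · have hs := pvDisjoint _ hm
      rw [hm, hs]
      simp only [ih, Prod.mk.injEq]
      constructor <;> push_cast <;> omega
    · rw [Bool.not_eq_true] at hm
      rw [hm]
      by_cases hs : PySem.Set.contains pvSevereSet (PySem.Str.upper h) = true
      · rw [hs]
        simp only [ih, Prod.mk.injEq]
        constructor <;> push_cast <;> omega
      · rw [Bool.not_eq_true] at hs
        rw [hs]
        simp only [ih, Prod.mk.injEq]
        constructor <;> push_cast <;> omega

-- A's inner token scan for one symptom is that symptom's occurrence count.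
theorem pvInner (sm : List String) (w : String) (a : Int) :
    (PySem.List.pyRange 0 (sm.length : Int) 1).foldl (fun acc2 x =>
      if PySem.Str.upper (PySem.List.pyGetD sm x "") == w then acc2 + 1 else acc2) a
    = a + sm.countP (fun v => PySem.Str.upper v == w) := by
  rw [PySem.List.foldl_pyRange_zero_pyGetD' sm ""
        (fun acc2 v => if PySem.Str.upper v == w then acc2 + 1 else acc2)]
  exact PySem.List.foldl_if_add_one (fun v => PySem.Str.upper v == w) sm a

-- The whole agreement, for an arbitrary token list.
theorem pvMain (sm : List String) :
    (let mildCount : Int :=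
      (PySem.List.pyRange 0 (pvMild.length : Int) 1).foldl (fun acc i =>
        (PySem.List.pyRange 0 (sm.length : Int) 1).foldl (fun acc2 x =>
          if PySem.Str.upper (PySem.List.pyGetD sm x "")
              == PySem.List.pyGetD pvMild i "" then acc2 + 1 else acc2) acc) 0
    let severeCount : Int :=
      (PySem.List.pyRange 0 (pvSevere.length : Int) 1).foldl (fun acc i =>
        (PySem.List.pyRange 0 (sm.length : Int) 1).foldl (fun acc2 x =>
          if PySem.Str.upper (PySem.List.pyGetD sm x "")
              == PySem.List.pyGetD pvSevere i "" then acc2 + 1 else acc2) acc) 0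
    if mildCount ≥ 3 ∧ severeCount = 0 then "mild symptoms"
    else if severeCount > 0 then "severe symptoms"
    else if mildCount < 3 ∧ severeCount = 0 then "no symptoms"
    else "")
    = (let counts := sm.foldl
        (fun (p : Int × Int) token =>
          let w := PySem.Str.upper token
          if PySem.Set.contains pvMildSet w then (p.1 + 1, p.2)
          else if PySem.Set.contains pvSevereSet w then (p.1, p.2 + 1)
          else p) ((0 : Int), (0 : Int))
      if counts.2 > 0 then "severe symptoms"
      else if counts.1 ≥ 3 then "mild symptoms"
      else "no symptoms") := by
  rw [PySem.List.foldl_pyRange_zero_pyGetD' pvMild ""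
        (fun acc s =>
          (PySem.List.pyRange 0 (sm.length : Int) 1).foldl (fun acc2 x =>
            if PySem.Str.upper (PySem.List.pyGetD sm x "") == s then acc2 + 1 else acc2) acc),
      PySem.List.foldl_pyRange_zero_pyGetD' pvSevere ""
        (fun acc s =>
          (PySem.List.pyRange 0 (sm.length : Int) 1).foldl (fun acc2 x =>
            if PySem.Str.upper (PySem.List.pyGetD sm x "") == s then acc2 + 1 else acc2) acc),
      pvFoldB]
  simp only [pvMild, pvSevere, List.foldl_cons, List.foldl_nil, pvInner]
  have hms := pvMildSum sm
  have hss := pvSevereSum sm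
  split_ifs <;> first | rfl | omega
theorem symptomsReturn_spec : Claim_equal_symptomsReturn := by
  intro message _
  unfold Spec_symptomsReturn symptomsReturn symptomsReturn_alt
  exact pvMain ((PySem.Str.split? message ", ").getD [])
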